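-- pv_equiv track=rewrite | github.com/CaoRX/sdd | src/qdmdealer/funcs/funcs.py | dealCheckerBoard
-- ===== SOURCE A (Python) =====
-- def dealCheckerBoard(x):
--     resX = []
--     resY = []
--     for i in range(len(x)):
--         if (i % 2 == 1):
--             resX.append(i)
--             resY.append(x[i])
--
--     return {'x': resX, 'y': resY}
-- ===== SOURCE B (Python) =====
-- def dealCheckerBoard(x):
--     return {'x': list(range(1, len(x), 2)), 'y': list(x[1::2])}
-- ===== Notes on version B (the rewrite author's own statement) =====
-- stated objective: idiomatic
-- what changed: Replaces the index loop with conditional appends by two independent computations: the odd indices come from range(1, len(x), 2) and the values from the stride-2 slice x[1::2].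
import Mathlib
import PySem

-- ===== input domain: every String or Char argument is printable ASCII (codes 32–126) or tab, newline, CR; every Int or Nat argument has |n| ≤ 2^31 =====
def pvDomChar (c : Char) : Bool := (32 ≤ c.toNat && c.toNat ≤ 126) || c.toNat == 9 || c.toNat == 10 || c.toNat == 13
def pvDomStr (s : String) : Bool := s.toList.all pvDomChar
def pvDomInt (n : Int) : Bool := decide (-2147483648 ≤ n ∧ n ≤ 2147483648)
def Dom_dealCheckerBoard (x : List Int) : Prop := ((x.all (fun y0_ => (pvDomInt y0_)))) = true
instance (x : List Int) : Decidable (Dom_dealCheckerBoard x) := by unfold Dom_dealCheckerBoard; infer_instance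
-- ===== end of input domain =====

-- B replaces A's single index loop (conditional appends when i is odd) by two independent
-- computations: range(1, len(x), 2) for the indices and the stride-2 slice x[1::2] for the
-- values (more idiomatic; same result).

-- ===== PORT A =====
-- the loop: for i in range(len(x)): if i % 2 == 1: resX.append(i); resY.append(x[i])
def dealCheckerBoard (x : List Int) : List (String × List Int) :=
  let res := (PySem.List.pyRange 0 x.length 1).foldl
    (fun (r : List Int × List Int) i =>
      if PySem.Int.mod i 2 == 1 then
        (r.1 ++ [i], r.2 ++ [PySem.List.pyGetD x i 0])  -- x[i]: i is always in range here
      else r)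
    ([], [])
  [("x", res.1), ("y", res.2)]

-- ===== PORT B =====
def dealCheckerBoard_alt (x : List Int) : List (String × List Int) :=
  [("x", PySem.List.pyRange 1 x.length 2),
   ("y", (PySem.List.slice? x (some 1) none 2).getD [])]  -- x[1::2]; step ≠ 0 so never none

-- ===== PRECONDITION & SPEC =====
def Spec_dealCheckerBoard (x : List Int) (out : List (String × List Int)) : Prop := out = dealCheckerBoard_alt x
instance (x : List Int) (out : List (String × List Int)) : Decidable (Spec_dealCheckerBoard x out) := by unfold Spec_dealCheckerBoard; infer_instance

-- ===== CLAIM (what is proved, stated in full; the proofs are below) =====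
def Claim_equal_dealCheckerBoard : Prop := ∀ (x : List Int), Dom_dealCheckerBoard x → Spec_dealCheckerBoard x (dealCheckerBoard x)

-- ===== LEMMAS AND PROOFS =====

-- A's loop result, characterised as two maps over range (n/2)
lemma foldA (x : List Int) (n : Nat) :
    (PySem.List.pyRange 0 n 1).foldl
      (fun (r : List Int × List Int) i =>
        if PySem.Int.mod i 2 == 1 then
          (r.1 ++ [i], r.2 ++ [PySem.List.pyGetD x i 0])
        else r)
      ([], [])
    = ((List.range (n/2)).map (fun k : Nat => 2*(k:Int)+1),
       (List.range (n/2)).map (fun k : Nat => PySem.List.pyGetD x (2*k+1) 0)) := by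
  induction n with
  | zero => simp
  | succ n ih =>
    have h : ((n+1 : Nat) : Int) = (n : Int) + 1 := by push_cast; ring
    rw [h, PySem.List.pyRange_one_succ_right (by positivity), List.foldl_append, ih]
    rcases Nat.even_or_odd n with ⟨m, rfl⟩ | ⟨m, rfl⟩
    · have hd : (m+m+1)/2 = (m+m)/2 := by omega
      simp [hd]
      exact ⟨m, by ring⟩
    · have hd : (2*m+1+1)/2 = m+1 := by omega
      have hn2 : (2*m+1)/2 = m := by omega
      simp [hd, hn2, List.range_succ]

-- B's odd-index range, characterised the same way
lemma rangeB (n : Nat) :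
    PySem.List.pyRange 1 n 2 = (List.range (n/2)).map (fun k : Nat => 2*(k:Int)+1) := by
  rw [PySem.List.pyRange_of_pos 1 n (by norm_num)]
  have hc : (if (1:Int) < n then (((n:Int) - 1 + 2 - 1) / 2).toNat else 0) = n/2 := by
    split_ifs with h
    · omega
    · omega
  rw [hc]
  apply List.map_congr_left
  intro k _; ring

-- B's stride-2 slice, characterised the same way
lemma sliceB (x : List Int) :
    (PySem.List.slice? x (some 1) none 2).getD []
      = (List.range (x.length/2)).map (fun k : Nat => PySem.List.pyGetD x (2*k+1) 0) := by
  simp [PySem.List.slice?, PySem.List.sliceIndices]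
  by_cases h : 1 < x.length
  · have hmin : min 1 (x.length:Int) = 1 := by omega
    have hcnt : (((x.length:Int) - min 1 (x.length:Int) + 2 - 1)/2).toNat = x.length/2 := by
      rw [hmin]; omega
    rw [if_pos h, hcnt, hmin]
    rw [← List.filterMap_eq_map (f := fun k : Nat => PySem.List.pyGetD x (2*k+1) 0)]
    apply List.filterMap_congr
    intro k hk
    simp only [List.mem_range] at hk
    have hlt : 2*k+1 < x.length := by omega
    have ht : ((1 : Int) + 2 * (k:Int)).toNat = 2*k+1 := by omega
    rw [ht, List.getElem?_eq_getElem hlt, Function.comp_apply,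
        PySem.List.pyGetD_eq_getElem x 0 (by omega) (by omega)]
    congr 2
  · rw [if_neg h]
    have : x.length / 2 = 0 := by omega
    simp [this]

-- ===== VERDICT (by name: the statement is the Claim_ definition above) =====
theorem dealCheckerBoard_spec : Claim_equal_dealCheckerBoard := by
  intro x _
  unfold Spec_dealCheckerBoard dealCheckerBoard dealCheckerBoard_alt
  rw [foldA x x.length, rangeB, sliceB]
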